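-- pv_equiv track=rewrite | github.com/tuannx/arcade-agent | src/arcade_agent/tools/recover.py | _common_prefix_segments
-- ===== SOURCE A (Python) =====
-- def _common_prefix_segments(packages: list[str]) -> list[str]:
--     """Find the longest common package prefix across all packages."""
--     if not packages:
--         return []
--     split_pkgs = [p.split(".") for p in packages]
--     prefix = []
--     for segments in zip(*split_pkgs):
--         if len(set(segments)) == 1:
--             prefix.append(segments[0])
--         else:
--             break
--     return prefix
-- ===== SOURCE B (Python) =====
-- def _cp(xs, ys):
--     out = []
--     for a, b in zip(xs, ys):
--         if a != b:
--             break
--         out.append(a)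
--     return out
--
--
-- def _common_prefix_segments(packages: list[str]) -> list[str]:
--     """Find the longest common package prefix across all packages."""
--     if not packages:
--         return []
--     prefix = packages[0].split(".")
--     for p in packages[1:]:
--         prefix = _cp(prefix, p.split("."))
--     return prefix
-- ===== Notes on version B (the rewrite author's own statement) =====
-- stated objective: alternative
-- what changed: Replaces the column-wise transpose (zip(*lists)) with a per-column set-cardinality test by a left fold that pairwise-intersects a running prefix with each package's segments, never materialising columns or sets.
import Mathlib
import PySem

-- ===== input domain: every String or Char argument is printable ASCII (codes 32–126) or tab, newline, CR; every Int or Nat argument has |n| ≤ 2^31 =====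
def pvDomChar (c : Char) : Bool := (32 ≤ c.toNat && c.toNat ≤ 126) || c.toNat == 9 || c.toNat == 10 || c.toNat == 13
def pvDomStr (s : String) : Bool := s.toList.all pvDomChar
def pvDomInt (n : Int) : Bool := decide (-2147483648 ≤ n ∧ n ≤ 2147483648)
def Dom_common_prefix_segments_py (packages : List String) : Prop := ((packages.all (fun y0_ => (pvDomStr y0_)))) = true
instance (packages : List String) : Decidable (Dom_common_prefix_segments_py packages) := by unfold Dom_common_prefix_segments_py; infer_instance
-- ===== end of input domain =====

-- B replaces A's column-wise scan of zip(*split_pkgs) with a per-column set-cardinality test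
-- by a left fold pairwise-intersecting a running prefix with each package's segments (objective: alternative).

-- ===== PORT A =====
-- p.split(".")
def pvSplit (p : String) : List String := (PySem.Str.split? p ".").getD []

-- number of iterations of 'for segments in zip(*lists)': zip stops at the shortest list
def pvZipLen (lists : List (List String)) : Nat :=
  match lists with
  | [] => 0
  | l :: ls => ls.foldl (fun m x => min m x.length) l.length

-- the 'for segments in zip(*split_pkgs): …' loop of A: one step per zip column
-- (fuel = the exact number of columns zip yields), break as A does
def aCols : Nat → List (List String) → List String
  | 0, _ => []
  | Nat.succ n, lists =>
    if (PySem.Set.ofList (lists.map (fun l => l.headI))).length = 1 then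
      (lists.map (fun l => l.headI)).headI :: aCols n (lists.map List.tail)
    else []

def common_prefix_segments_py (packages : List String) : List String :=
  if packages = [] then []
  else aCols (pvZipLen (packages.map pvSplit)) (packages.map pvSplit)

-- ===== PORT B =====
-- _cp(xs, ys): walk the two lists together, keep while equal, break at first mismatch
def cpAlt : List String → List String → List String
  | a :: as, b :: bs => if a = b then a :: cpAlt as bs else []
  | _, _ => []

def common_prefix_segments_py_alt (packages : List String) : List String :=
  match packages with
  | [] => []
  | p :: ps => ps.foldl (fun pre q => cpAlt pre (pvSplit q)) (pvSplit p)

-- ===== PRECONDITION & SPEC =====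
def Spec_common_prefix_segments_py (packages : List String) (out : List String) : Prop := out = common_prefix_segments_py_alt packages
instance (packages : List String) (out : List String) : Decidable (Spec_common_prefix_segments_py packages out) := by unfold Spec_common_prefix_segments_py; infer_instance

-- ===== CLAIM (what is proved, stated in full; the proofs are below) =====
def Claim_equal_common_prefix_segments_py : Prop := ∀ (packages : List String), Dom_common_prefix_segments_py packages → Spec_common_prefix_segments_py packages (common_prefix_segments_py packages)

-- ===== LEMMAS AND PROOFS =====

theorem cpAlt_nil_left (y : List String) : cpAlt [] y = [] := by
  cases y <;> rfl

theorem foldl_cpAlt_nil (t : List (List String)) : t.foldl cpAlt [] = [] := by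
  induction t with
  | nil => rfl
  | cons y t ih => simpa [cpAlt_nil_left] using ih

theorem cpAlt_prefix_left (x y : List String) : cpAlt x y <+: x := by
  induction x generalizing y with
  | nil => simp [cpAlt_nil_left]
  | cons a as ih =>
    cases y with
    | nil => simp [cpAlt]
    | cons b bs =>
      by_cases h : a = b
      · subst h
        simp only [cpAlt]
        exact List.cons_prefix_cons.mpr ⟨rfl, ih bs⟩
      · simp [cpAlt, h]

theorem cpAlt_prefix_right (x y : List String) : cpAlt x y <+: y := by
  induction x generalizing y with
  | nil => simp [cpAlt_nil_left]
  | cons a as ih =>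
    cases y with
    | nil => simp [cpAlt]
    | cons b bs =>
      by_cases h : a = b
      · subst h
        simp only [cpAlt]
        exact List.cons_prefix_cons.mpr ⟨rfl, ih bs⟩
      · simp [cpAlt, h]

theorem foldl_cpAlt_prefix_left (t : List (List String)) (x : List String) :
    t.foldl cpAlt x <+: x := by
  induction t generalizing x with
  | nil => simp
  | cons y t ih =>
    exact (ih (cpAlt x y)).trans (cpAlt_prefix_left x y)

theorem foldl_cpAlt_prefix_mem (t : List (List String)) : ∀ (x l : List String), l ∈ t →
    t.foldl cpAlt x <+: l := by
  induction t with
  | nil => intro x l hl; cases hl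
  | cons y t ih =>
    intro x l hl
    rcases List.mem_cons.mp hl with rfl | hl'
    · exact (foldl_cpAlt_prefix_left t (cpAlt x l)).trans (cpAlt_prefix_right x l)
    · exact ih (cpAlt x y) l hl'

theorem prefix_two_ne (x as bs : List String) (a b : String) (hab : a ≠ b)
    (h1 : x <+: a :: as) (h2 : x <+: b :: bs) : x = [] := by
  cases x with
  | nil => rfl
  | cons c cs =>
    have e1 : c = a := by
      rcases h1 with ⟨r, hr⟩
      simpa using (congrArg (fun l => l.headI) hr.symm).symm
    have e2 : c = b := by
      rcases h2 with ⟨r, hr⟩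
      simpa using (congrArg (fun l => l.headI) hr.symm).symm
    exact absurd (e1 ▸ e2) hab

theorem foldl_cpAlt_unfold (a : String) (as : List String) (t : List (List String))
    (h : ∀ l ∈ t, ∃ bs, l = a :: bs) :
    t.foldl cpAlt (a :: as) = a :: (t.map List.tail).foldl cpAlt as := by
  induction t generalizing as with
  | nil => simp
  | cons y t ih =>
    obtain ⟨bs, rfl⟩ := h y (List.mem_cons_self)
    have step : cpAlt (a :: as) (a :: bs) = a :: cpAlt as bs := by simp [cpAlt]
    simp only [List.foldl_cons, step, List.map_cons, List.tail_cons]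
    exact ih (cpAlt as bs) (fun l hl => h l (List.mem_cons_of_mem _ hl))

theorem setLen_one_iff (a : String) (rest : List String) :
    (PySem.Set.ofList (a :: rest)).length = 1 ↔ ∀ x ∈ rest, x = a := by
  constructor
  · intro h x hx
    by_contra hne
    obtain ⟨y, hy⟩ := List.length_eq_one_iff.mp h
    have ha : a ∈ PySem.Set.ofList (a :: rest) := (PySem.Set.mem_ofList _ _).mpr (by simp)
    have hxm : x ∈ PySem.Set.ofList (a :: rest) := (PySem.Set.mem_ofList _ _).mpr (by simp [hx])
    rw [hy] at ha hxm
    simp at ha hxm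
    exact hne (hxm.trans ha.symm)
  · intro h
    have hmem : ∀ y, y ∈ PySem.Set.ofList (a :: rest) ↔ y = a := by
      intro y
      rw [PySem.Set.mem_ofList _ _]
      constructor
      · rintro hy
        rcases List.mem_cons.mp hy with rfl | hy'
        · rfl
        · exact h y hy'
      · rintro rfl; simp
    have hnd : (PySem.Set.ofList (a :: rest)).Nodup := PySem.Set.nodup_ofList _
    cases hs : PySem.Set.ofList (a :: rest) with
    | nil =>
      have := (hmem a).mpr rfl
      rw [hs] at this
      cases this
    | cons b bs =>
      have hb : b = a := (hmem b).mp (by rw [hs]; simp)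
      cases bs with
      | nil => simp
      | cons c cs =>
        have hc : c = a := (hmem c).mp (by rw [hs]; simp)
        rw [hs] at hnd
        exfalso
        exact (List.nodup_cons.mp hnd).1 (by simp [hb, hc])

theorem foldlMin_le_init (t : List (List String)) : ∀ x : Nat,
    t.foldl (fun m l => min m l.length) x ≤ x := by
  induction t with
  | nil => intro x; simp
  | cons l ls ih =>
    intro x
    exact le_trans (ih (min x l.length)) (Nat.min_le_left _ _)

theorem foldlMin_le_mem (t : List (List String)) : ∀ (x : Nat) (l : List String), l ∈ t →
    t.foldl (fun m l => min m l.length) x ≤ l.length := by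
  induction t with
  | nil => intro x l hl; cases hl
  | cons y ys ih =>
    intro x l hl
    rcases List.mem_cons.mp hl with rfl | hl'
    · exact le_trans (foldlMin_le_init ys (min x l.length)) (Nat.min_le_right _ _)
    · exact ih (min x y.length) l hl'

theorem foldlMin_pos (t : List (List String)) (ht : ∀ l ∈ t, l ≠ []) : ∀ x : Nat, x ≠ 0 →
    t.foldl (fun m l => min m l.length) x ≠ 0 := by
  induction t with
  | nil => intro x hx; simpa using hx
  | cons y ys ih =>
    intro x hx
    have hy : y.length ≠ 0 := by
      have := ht y List.mem_cons_self
      simpa [List.length_eq_zero_iff] using this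
    exact ih (fun l hl => ht l (List.mem_cons_of_mem _ hl)) (min x y.length)
      (by omega)

theorem foldlMin_tail (t : List (List String)) (ht : ∀ l ∈ t, l ≠ []) : ∀ x : Nat,
    (t.map List.tail).foldl (fun m l => min m l.length) (x - 1)
      = t.foldl (fun m l => min m l.length) x - 1 := by
  induction t with
  | nil => intro x; simp
  | cons y ys ih =>
    intro x
    have hy : y.length ≠ 0 := by
      have := ht y List.mem_cons_self
      simpa [List.length_eq_zero_iff] using this
    have htl : y.tail.length = y.length - 1 := List.length_tail
    have hmin : min (x - 1) (y.length - 1) = min x y.length - 1 := by omega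
    simp only [List.map_cons, List.foldl_cons, htl, hmin]
    exact ih (fun l hl => ht l (List.mem_cons_of_mem _ hl)) (min x y.length)

theorem aCols_eq_foldl : ∀ (n : Nat) (h : List String) (t : List (List String)),
    pvZipLen (h :: t) = n → aCols n (h :: t) = t.foldl cpAlt h := by
  intro n
  induction n with
  | zero =>
    intro h t hz
    show [] = _
    cases h with
    | nil => exact (foldl_cpAlt_nil t).symm
    | cons a as =>
      have hex : ∃ l ∈ t, l = [] := by
        by_contra hc
        push Not at hc
        have := foldlMin_pos t hc (a :: as).length (by simp)
        exact this hz
      obtain ⟨l, hl, rfl⟩ := hex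
      exact (List.prefix_nil.mp (foldl_cpAlt_prefix_mem t (a :: as) [] hl)).symm
  | succ n ih =>
    intro h t hz
    have hzf : t.foldl (fun m l => min m l.length) h.length = n + 1 := hz
    have hh : h ≠ [] := by
      intro e
      subst e
      have h1 := foldlMin_le_init t ([] : List String).length
      rw [hzf] at h1
      simp at h1
    obtain ⟨a, as, rfl⟩ : ∃ a as, h = a :: as := by
      cases h with
      | nil => exact absurd rfl hh
      | cons a as => exact ⟨a, as, rfl⟩
    have hall : ∀ l ∈ t, l ≠ [] := by
      intro l hl e
      subst e
      have := foldlMin_le_mem t (a :: as).length [] hl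
      rw [hzf] at this
      simp at this
    by_cases hheads : ∀ l ∈ t, l.headI = a
    · have hshape : ∀ l ∈ t, ∃ bs, l = a :: bs := by
        intro l hl
        cases l with
        | nil => exact absurd rfl (hall [] hl)
        | cons b bs => exact ⟨bs, by rw [← hheads (b :: bs) hl]; rfl⟩
      have hone : (PySem.Set.ofList (((a :: as) :: t).map (fun l => l.headI))).length = 1 := by
        simp only [List.map_cons, List.headI_cons]
        rw [setLen_one_iff]
        intro x hx
        obtain ⟨l, hl, rfl⟩ := List.mem_map.mp hx
        exact hheads l hl
      have hz' : pvZipLen (as :: t.map List.tail) = n := by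
        show (t.map List.tail).foldl (fun m l => min m l.length) as.length = n
        have h3 := foldlMin_tail t hall (a :: as).length
        have h4 : (a :: as).length - 1 = as.length := by simp
        rw [h4] at h3
        rw [h3, hzf]
        omega
      show (if _ then _ else _) = _
      rw [if_pos hone]
      simp only [List.map_cons, List.headI_cons, List.tail_cons]
      rw [ih as (t.map List.tail) hz']
      exact (foldl_cpAlt_unfold a as t hshape).symm
    · push Not at hheads
      obtain ⟨l, hl, hne⟩ := hheads
      obtain ⟨b, bs, rfl⟩ : ∃ b bs, l = b :: bs := by
        cases l with
        | nil => exact absurd rfl (hall [] hl)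
        | cons b bs => exact ⟨b, bs, rfl⟩
      have hbne : b ≠ a := by simpa using hne
      have hone : ¬ (PySem.Set.ofList (((a :: as) :: t).map (fun l => l.headI))).length = 1 := by
        simp only [List.map_cons, List.headI_cons]
        rw [setLen_one_iff]
        intro hforall
        exact hbne (hforall b (List.mem_map.mpr ⟨b :: bs, hl, rfl⟩))
      show (if _ then _ else _) = _
      rw [if_neg hone]
      exact (prefix_two_ne _ as bs a b (fun e => hbne e.symm)
        (foldl_cpAlt_prefix_left t (a :: as))
        (foldl_cpAlt_prefix_mem t (a :: as) (b :: bs) hl)).symm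

-- ===== VERDICT (by name: the statement is the Claim_ definition above) =====
theorem common_prefix_segments_py_spec : Claim_equal_common_prefix_segments_py := by
  intro packages _
  unfold Spec_common_prefix_segments_py
  cases packages with
  | nil => rfl
  | cons p ps =>
    unfold common_prefix_segments_py common_prefix_segments_py_alt
    rw [if_neg (by simp)]
    simp only [List.map_cons]
    rw [aCols_eq_foldl _ _ _ rfl, List.foldl_map]
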